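-- pv_equiv track=rewrite | github.com/NicoFuentese/Fundamentos-de-Algoritmos-PUCV | MODULO2/3.4_funcionesPractica.py | sumaSerieAlternada
-- ===== SOURCE A (Python) =====
-- def sumaSerieAlternada (numero):
--     valor = 4
--     suma = 0
--     for i in range (1, numero + 1):
--         if ( i == 1):
--             valor = valor
--         elif ( i % 2 == 0):
--             valor *= 2
--         elif ( i % 2 != 0):
--             valor -= 3
--         suma += valor
--     return suma
-- ===== SOURCE B (Python) =====
-- def sumaSerieAlternada(numero):
--     # Closed form: the loop's values are 4, 8, 5, 10, 7, 14, ... ;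
--     # even positions 2m hold 2**m + 6, odd positions 2m+1 hold 2**m + 3.
--     if numero <= 0:
--         return 0
--     m, r = divmod(numero, 2)
--     if r:
--         return (1 << (m + 2)) + 9 * m
--     return 3 * (1 << m) + 9 * m - 3
-- ===== Notes on version B (the rewrite author's own statement) =====
-- stated objective: faster
-- what changed: Replaces the O(n) accumulation loop by a closed-form expression (the loop's values are 2^m+6 at even positions and 2^m+3 at odd ones, so the sum is a geometric-plus-linear formula computed with one shift and a divmod); intended as faster: a timing run measured B over 100x faster at the largest size both finish, though at the top size some runs are limited only by stringifying the huge exact result.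
import Mathlib
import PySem

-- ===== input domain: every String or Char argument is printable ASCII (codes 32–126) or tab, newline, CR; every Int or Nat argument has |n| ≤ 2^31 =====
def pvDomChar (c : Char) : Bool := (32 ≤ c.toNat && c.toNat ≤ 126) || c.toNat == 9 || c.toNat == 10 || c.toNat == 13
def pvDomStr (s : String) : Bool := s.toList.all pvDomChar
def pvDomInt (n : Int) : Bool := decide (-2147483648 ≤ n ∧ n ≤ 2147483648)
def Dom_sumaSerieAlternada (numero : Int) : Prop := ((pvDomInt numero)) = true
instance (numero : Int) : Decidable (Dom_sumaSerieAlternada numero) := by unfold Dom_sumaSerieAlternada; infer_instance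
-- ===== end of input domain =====

-- B replaces A's loop by a closed-form expression for the accumulated sum (alternative algorithm; return value only).
-- ===== PORT A =====
def sumaSerieAlternada (numero : Int) : Int :=
  let st := (PySem.List.pyRange 1 (numero + 1) 1).foldl
    (fun (s : Int × Int) (i : Int) =>
      let valor :=
        if i == 1 then s.1
        else if PySem.Int.mod i 2 == 0 then s.1 * 2
        else if PySem.Int.mod i 2 != 0 then s.1 - 3
        else s.1
      (valor, s.2 + valor)) (4, 0)
  st.2

-- ===== PORT B =====
def sumaSerieAlternada_alt (numero : Int) : Int :=
  if numero ≤ 0 then 0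
  else
    let m := PySem.Int.floordiv numero 2
    let r := PySem.Int.mod numero 2
    if r ≠ 0 then 2 ^ (m + 2).toNat + 9 * m   -- 1 << (m+2)
    else 3 * 2 ^ m.toNat + 9 * m - 3          -- 3 * (1 << m)

-- ===== PRECONDITION & SPEC =====
def Spec_sumaSerieAlternada (numero : Int) (out : Int) : Prop := out = sumaSerieAlternada_alt numero
instance (numero : Int) (out : Int) : Decidable (Spec_sumaSerieAlternada numero out) := by unfold Spec_sumaSerieAlternada; infer_instance

-- ===== CLAIM (what is proved, stated in full; the proofs are below) =====
def Claim_equal_sumaSerieAlternada : Prop := ∀ (numero : Int), Dom_sumaSerieAlternada numero → Spec_sumaSerieAlternada numero (sumaSerieAlternada numero)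

-- ===== LEMMAS AND PROOFS =====

-- closed-form value held by A's `valor` after processing i = 1..n
def pvV (n : Nat) : Int :=
  if n = 0 then 4 else if n % 2 = 0 then 2 ^ (n / 2) + 6 else 2 ^ (n / 2) + 3

-- closed-form value of A's `suma` after processing i = 1..n
def pvS (n : Nat) : Int :=
  if n % 2 = 0 then 3 * 2 ^ (n / 2) + 9 * ((n / 2 : Nat) : Int) - 3
  else 2 ^ (n / 2 + 2) + 9 * ((n / 2 : Nat) : Int)

def pvStep (s : Int × Int) (i : Int) : Int × Int :=
  let valor :=
    if i == 1 then s.1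
    else if PySem.Int.mod i 2 == 0 then s.1 * 2
    else if PySem.Int.mod i 2 != 0 then s.1 - 3
    else s.1
  (valor, s.2 + valor)

lemma pymod2 (i : Int) : PySem.Int.mod i 2 = i % 2 := by
  simp [PySem.Int.mod, Int.fmod_eq_emod]

lemma pyfdiv2 (i : Int) : PySem.Int.floordiv i 2 = i / 2 := by
  simp [PySem.Int.floordiv, Int.fdiv_eq_ediv]

lemma pvStep_eq (s : Int × Int) (i : Int) :
    pvStep s i =
      ((if i = 1 then s.1 else if i % 2 = 0 then s.1 * 2 else s.1 - 3),
       s.2 + (if i = 1 then s.1 else if i % 2 = 0 then s.1 * 2 else s.1 - 3)) := by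
  unfold pvStep
  rw [pymod2 i]
  by_cases h1 : i = 1
  · simp [h1]
  · by_cases h2 : i % 2 = 0 <;> simp [h1, h2]

lemma pvV_odd (j : Nat) : pvV (2 * j + 1) = 2 ^ j + 3 := by
  have e0 : ¬ (2 * j + 1 = 0) := by omega
  have e1 : (2 * j + 1) % 2 = 1 := by omega
  have e2 : (2 * j + 1) / 2 = j := by omega
  rw [pvV, if_neg e0, e1, e2]; simp

lemma pvV_even (j : Nat) (hj : 1 ≤ j) : pvV (2 * j) = 2 ^ j + 6 := by
  have e0 : ¬ (2 * j = 0) := by omega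
  have e1 : (2 * j) % 2 = 0 := by omega
  have e2 : (2 * j) / 2 = j := by omega
  rw [pvV, if_neg e0, e1, e2]; simp

lemma pvS_even (j : Nat) : pvS (2 * j) = 3 * 2 ^ j + 9 * j - 3 := by
  have e1 : (2 * j) % 2 = 0 := by omega
  have e2 : (2 * j) / 2 = j := by omega
  rw [pvS, e1, e2]; simp

lemma pvS_odd (j : Nat) : pvS (2 * j + 1) = 2 ^ (j + 2) + 9 * j := by
  have e1 : (2 * j + 1) % 2 = 1 := by omega
  have e2 : (2 * j + 1) / 2 = j := by omega
  rw [pvS, e1, e2]; simp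

lemma loop_spec (n : Nat) :
    (PySem.List.pyRange 1 ((n : Int) + 1) 1).foldl pvStep (4, 0) = (pvV n, pvS n) := by
  induction n with
  | zero =>
    rw [PySem.List.pyRange_one_eq_nil (by omega)]
    simp [pvV, pvS]
  | succ n ih =>
    have hsplit : PySem.List.pyRange 1 ((n : Int) + 1 + 1) 1
        = PySem.List.pyRange 1 ((n : Int) + 1) 1 ++ [(n : Int) + 1] := by
      have := PySem.List.pyRange_one_succ_right (a := 1) (b := (n : Int) + 1) (by omega)
      simpa using this
    push_cast
    rw [hsplit, List.foldl_append, ih]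
    simp only [List.foldl_cons, List.foldl_nil]
    rw [pvStep_eq]
    rcases Nat.even_or_odd n with ⟨j, hj⟩ | ⟨j, hj⟩
    · -- n = 2j, i = n + 1 odd
      have hj2 : n = 2 * j := by omega
      subst hj2
      rcases Nat.eq_zero_or_pos j with rfl | hjpos
      · -- i = 1
        norm_num [pvV, pvS]
      · rw [if_neg (by push_cast; omega : ¬ (((2 * j : Nat) : Int) + 1 = 1)),
            if_neg (by push_cast; omega : ¬ ((((2 * j : Nat) : Int) + 1) % 2 = 0))]
        rw [pvV_even j hjpos, pvV_odd j, pvS_even j, pvS_odd j]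
        simp only [Prod.mk.injEq]
        refine ⟨by ring, by ring⟩
    · -- n = 2j + 1, i = n + 1 even
      subst hj
      rw [if_neg (by push_cast; omega : ¬ (((2 * j + 1 : Nat) : Int) + 1 = 1)),
          if_pos (by push_cast; omega : ((((2 * j + 1 : Nat) : Int) + 1) % 2 = 0))]
      have hn2 : 2 * j + 1 + 1 = 2 * (j + 1) := by omega
      rw [pvV_odd j, pvS_odd j, hn2, pvV_even (j + 1) (by omega), pvS_even (j + 1)]
      simp only [Prod.mk.injEq]
      refine ⟨by ring, by push_cast; ring⟩

lemma alt_eq_pvS (n : Nat) : sumaSerieAlternada_alt (n : Int) = pvS n := by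
  unfold sumaSerieAlternada_alt
  by_cases h0 : n = 0
  · subst h0; simp [pvS]
  · have hpos : ¬ ((n : Int) ≤ 0) := by omega
    rw [if_neg hpos, pyfdiv2, pymod2]
    rcases Nat.even_or_odd n with ⟨j, hj⟩ | ⟨j, hj⟩
    · have hj2 : n = 2 * j := by omega
      subst hj2
      have hd : ((2 * j : Nat) : Int) / 2 = (j : Int) := by push_cast; omega
      have hm : ((2 * j : Nat) : Int) % 2 = 0 := by push_cast; omega
      rw [hd, hm, if_neg (by simp), pvS_even j]
      have : (j : Int).toNat = j := by omega
      rw [this]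
    · subst hj
      have hd : ((2 * j + 1 : Nat) : Int) / 2 = (j : Int) := by push_cast; omega
      have hm : ((2 * j + 1 : Nat) : Int) % 2 = 1 := by push_cast; omega
      rw [hd, hm, if_pos (by simp), pvS_odd j]
      have : ((j : Int) + 2).toNat = j + 2 := by omega
      rw [this]

-- ===== VERDICT (by name: the statement is the Claim_ definition above) =====
theorem sumaSerieAlternada_spec : Claim_equal_sumaSerieAlternada := by
  intro numero _
  unfold Spec_sumaSerieAlternada sumaSerieAlternada
  by_cases h : numero ≤ 0
  · rw [PySem.List.pyRange_one_eq_nil (by omega)]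
    simp [sumaSerieAlternada_alt, h]
  · obtain ⟨n, rfl⟩ : ∃ n : Nat, numero = (n : Int) :=
      ⟨numero.toNat, by omega⟩
    rw [show (fun (s : Int × Int) (i : Int) =>
          let valor :=
            if i == 1 then s.1
            else if PySem.Int.mod i 2 == 0 then s.1 * 2
            else if PySem.Int.mod i 2 != 0 then s.1 - 3
            else s.1
          (valor, s.2 + valor)) = pvStep from rfl]
    rw [loop_spec n, alt_eq_pvS]
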